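-- pv_equiv track=rewrite | github.com/Poehavshiy/dataBases | app/post_functions.py | repair_desc_tree
-- ===== SOURCE A (Python) =====
-- def repair_parent_tree(dict, limit):
--     i = 0
--     count = 0
--     while count <= limit and i < len(dict):
--         if dict[i]["path"].count("/") == 1:
--             count = count + 1
--         if count <= limit:
--             i = i + 1
--     new_dict = dict[:i]
--     return new_dict
--
-- def repair_desc_tree(base_dict, limit, order, sort_type):
--     if order == "asc":
--         base_dict = base_dict[:limit]
--         return base_dict
--     else:
--         new_dict = []
--         end = len(base_dict) - 1
--         i = end
--         while i >= 0:
--             if base_dict[i]["path"].count("/") == 1: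
--                 new_dict.extend(base_dict[i:end + 1])
--                 end = i - 1
--             i = i - 1
--         if sort_type == "tree":
--             new_dict = new_dict[:limit]
--         else:
--             new_dict = repair_parent_tree(new_dict, limit)
--         return new_dict
-- ===== SOURCE B (Python) =====
-- def repair_desc_tree(base_dict, limit, order, sort_type):
--     if order == "asc":
--         return base_dict[:limit]
--     # group the list at each top-level node (path.count('/') == 1);
--     # nodes before the first top-level node are dropped
--     groups = []
--     current = None
--     for node in base_dict:
--         if node["path"].count("/") == 1:
--             if current is not None:
--                 groups.append(current)
--             current = [node]
--         elif current is not None: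
--             current.append(node)
--     if current is not None:
--         groups.append(current)
--     new_dict = [n for g in reversed(groups) for n in g]
--     if sort_type == "tree":
--         return new_dict[:limit]
--     # keep the prefix up to (excluding) the (limit+1)-th top-level node
--     if limit < 0:
--         return []
--     count = 0
--     out = []
--     for node in new_dict:
--         if node["path"].count("/") == 1:
--             count += 1
--             if count > limit:
--                 break
--         out.append(node)
--     return out
-- ===== Notes on version B (the rewrite author's own statement) =====
-- stated objective: simpler
-- what changed: Replaces A's backward index-walk with per-marker extend-slices by a single forward pass that collects groups started at each top-level node, then reverses and flattens the group list; the parent-limit helper becomes one counting prefix scan instead of A's index/while machinery.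
import Mathlib
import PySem

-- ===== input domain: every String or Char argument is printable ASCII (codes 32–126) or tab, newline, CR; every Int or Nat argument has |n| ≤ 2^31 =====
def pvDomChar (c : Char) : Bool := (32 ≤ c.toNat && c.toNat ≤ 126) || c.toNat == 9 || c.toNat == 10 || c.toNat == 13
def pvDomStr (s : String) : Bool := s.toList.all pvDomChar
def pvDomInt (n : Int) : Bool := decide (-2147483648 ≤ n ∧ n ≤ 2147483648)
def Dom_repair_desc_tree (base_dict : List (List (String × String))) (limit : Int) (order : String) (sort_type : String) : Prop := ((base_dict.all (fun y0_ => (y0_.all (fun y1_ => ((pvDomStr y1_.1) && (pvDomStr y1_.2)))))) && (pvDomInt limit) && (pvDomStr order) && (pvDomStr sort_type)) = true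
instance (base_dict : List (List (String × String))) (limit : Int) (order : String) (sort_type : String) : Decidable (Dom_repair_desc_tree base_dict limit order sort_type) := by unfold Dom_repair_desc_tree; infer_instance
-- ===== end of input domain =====

-- B replaces A's backward index-walk (extend-with-slice at each top-level node) by one forward
-- grouping pass followed by reverse-and-flatten, and the parent-limit helper by a counting prefix
-- scan; objective: simpler.

-- ===== PORT A =====
-- node["path"].count("/") == 1 — the same expression both Pythons evaluate verbatim; the
-- .getD defaults below are never consulted on inputs admitted by Pre_ (the "path" key exists
-- and every index the loops use is in range)
def pvPathTop (node : List (String × String)) : Bool :=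
  PySem.Str.count (PySem.Dict.getD (PySem.Dict.mk node) "path" "") "/" == 1
-- the 'while i >= 0' loop of A's else branch; fuel n = i+1, i the current index
def pvALoop (bd : List (List (String × String))) :
    Nat → Int → List (List (String × String)) → List (List (String × String))
  | 0, _, nd => nd
  | n+1, endI, nd =>
    if pvPathTop ((PySem.List.pyGet? bd (n : Int)).getD []) then
      pvALoop bd n ((n : Int) - 1) (nd ++ PySem.List.slice bd (some (n : Int)) (some (endI + 1)))
    else pvALoop bd n endI nd
-- the while loop of repair_parent_tree; returns the final i
def pvRPTloop (d : List (List (String × String))) (limit : Int) (count : Int) (i : Nat) : Nat :=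
  if h : count ≤ limit ∧ i < d.length then
    let count' := if pvPathTop ((PySem.List.pyGet? d (i : Int)).getD []) then count + 1 else count
    if count' ≤ limit then pvRPTloop d limit count' (i+1) else i
  else i
termination_by d.length - i
decreasing_by omega

def repair_parent_tree (d : List (List (String × String))) (limit : Int) :
    List (List (String × String)) :=
  PySem.List.slice d none (some ((pvRPTloop d limit 0 0 : Nat) : Int))

def repair_desc_tree (base_dict : List (List (String × String))) (limit : Int) (order : String)
    (sort_type : String) : List (List (String × String)) :=
  if order = "asc" then PySem.List.slice base_dict none (some limit)
  else
    let new_dict := pvALoop base_dict base_dict.length ((base_dict.length : Int) - 1) []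
    if sort_type = "tree" then PySem.List.slice new_dict none (some limit)
    else repair_parent_tree new_dict limit

-- ===== PORT B =====
-- Source B's grouping state: (finished groups, current group or None); pvBFin is the final
-- 'if current is not None: groups.append(current)'
def pvBFin (s : List (List (List (String × String))) × Option (List (List (String × String)))) :
    List (List (List (String × String))) :=
  match s.2 with | some c => s.1 ++ [c] | none => s.1
def pvBStep (s : List (List (List (String × String))) × Option (List (List (String × String))))
    (node : List (String × String)) :
    List (List (List (String × String))) × Option (List (List (String × String))) :=
  if pvPathTop node then (pvBFin s, some [node])
  else
    match s.2 with
    | some c => (s.1, some (c ++ [node]))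
    | none => (s.1, none)
def pvBGroups (bd : List (List (String × String))) : List (List (List (String × String))) :=
  pvBFin (bd.foldl pvBStep ([], none))
def pvBNew (bd : List (List (String × String))) : List (List (String × String)) :=
  (pvBGroups bd).reverse.flatMap id
-- Source B's counting prefix loop (break = stop)
def pvBLimit (limit : Int) : Int → List (List (String × String)) → List (List (String × String))
  | _, [] => []
  | count, node :: rest =>
    if pvPathTop node then
      if count + 1 > limit then [] else node :: pvBLimit limit (count + 1) rest
    else node :: pvBLimit limit count rest

def repair_desc_tree_alt (base_dict : List (List (String × String))) (limit : Int) (order : String)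
    (sort_type : String) : List (List (String × String)) :=
  if order = "asc" then PySem.List.slice base_dict none (some limit)
  else
    let new_dict := pvBNew base_dict
    if sort_type = "tree" then PySem.List.slice new_dict none (some limit)
    else if limit < 0 then [] else pvBLimit limit 0 new_dict

-- ===== PRECONDITION & SPEC =====
-- Pre_ excludes exactly the inputs on which Python A raises KeyError: any non-"asc" call
-- evaluates node["path"] on every element of base_dict, so each element must carry a "path" key.
def Pre_repair_desc_tree (base_dict : List (List (String × String))) (limit : Int) (order : String) (sort_type : String) : Prop :=
  order = "asc" ∨ ∀ node ∈ base_dict, (PySem.Dict.get? (PySem.Dict.mk node) "path").isSome = true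
instance (base_dict : List (List (String × String))) (limit : Int) (order : String) (sort_type : String) : Decidable (Pre_repair_desc_tree base_dict limit order sort_type) := by unfold Pre_repair_desc_tree; infer_instance

def pvWitness_repair_desc_tree : (List (List (String × String))) × Int × String × String :=
  ([[("path", "a/b")], [("path", "a/b/c")], [("path", "q/w")]], 2, "desc", "parent")

def Spec_repair_desc_tree (base_dict : List (List (String × String))) (limit : Int) (order : String) (sort_type : String) (out : List (List (String × String))) : Prop := out = repair_desc_tree_alt base_dict limit order sort_type
instance (base_dict : List (List (String × String))) (limit : Int) (order : String) (sort_type : String) (out : List (List (String × String))) : Decidable (Spec_repair_desc_tree base_dict limit order sort_type out) := by unfold Spec_repair_desc_tree; infer_instance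

-- ===== CLAIM (what is proved, stated in full; the proofs are below) =====
def Claim_equal_repair_desc_tree : Prop := ∀ (base_dict : List (List (String × String))) (limit : Int) (order : String) (sort_type : String), Dom_repair_desc_tree base_dict limit order sort_type → Pre_repair_desc_tree base_dict limit order sort_type → Spec_repair_desc_tree base_dict limit order sort_type (repair_desc_tree base_dict limit order sort_type)

-- ===== LEMMAS AND PROOFS =====
theorem pvALoop_acc (bd : List (List (String × String))) :
    ∀ (n : Nat) (endI : Int) (nd : List (List (String × String))),
      pvALoop bd n endI nd = nd ++ pvALoop bd n endI [] := by
  intro n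
  induction n with
  | zero => intro endI nd; simp [pvALoop]
  | succ n ih =>
    intro endI nd
    simp only [pvALoop]
    split
    · rw [ih, ih]
      simp only [List.nil_append]
      rw [ih _ (PySem.List.slice bd (some (n : Int)) (some (endI + 1)))]
      simp
    · exact ih _ _

theorem pvALoop_skip (bd : List (List (String × String))) :
    ∀ (k n : Nat) (endI : Int) (nd : List (List (String × String))),
      (∀ j, n ≤ j → j < n + k → pvPathTop ((PySem.List.pyGet? bd (j : Int)).getD []) = false) →
      pvALoop bd (n + k) endI nd = pvALoop bd n endI nd := by
  intro k
  induction k with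
  | zero => intro n endI nd _; rfl
  | succ k ih =>
    intro n endI nd h
    show pvALoop bd ((n + k) + 1) endI nd = _
    simp only [pvALoop, h (n + k) (by omega) (by omega)]
    exact ih n endI nd (fun j h1 h2 => h j h1 (by omega))

theorem pvALoop_local (u v : List (List (String × String))) :
    ∀ (n : Nat) (endI : Int) (nd : List (List (String × String))),
      n ≤ u.length → 0 ≤ endI + 1 → endI + 1 ≤ (u.length : Int) →
      pvALoop (u ++ v) n endI nd = pvALoop u n endI nd := by
  intro n
  induction n with
  | zero => intro _ _ _ _ _; rfl
  | succ n ih =>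
    intro endI nd hn h0 hu
    have hget : PySem.List.pyGet? (u ++ v) (n : Int) = PySem.List.pyGet? u (n : Int) := by
      simp [PySem.List.pyGet?_natCast, List.getElem?_append_left (by omega : n < u.length)]
    have hslice : PySem.List.slice (u ++ v) (some (n : Int)) (some (endI + 1))
        = PySem.List.slice u (some (n : Int)) (some (endI + 1)) := by
      rw [PySem.List.slice_toNat (u ++ v) (Int.natCast_nonneg n) h0,
          PySem.List.slice_toNat u (Int.natCast_nonneg n) h0]
      rw [List.drop_append_of_le_length (by simpa using (by omega : n ≤ u.length))]
      rw [List.take_append_of_le_length (by simp; omega)]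
    simp only [pvALoop, hget, hslice]
    split
    · exact ih _ _ (by omega) (by omega) (by omega)
    · exact ih _ _ (by omega) h0 hu

theorem pvBStep_free (e : List (List (String × String)))
    (h : ∀ x ∈ e, pvPathTop x = false) :
    ∀ (G : List (List (List (String × String)))) (c : List (List (String × String))),
      e.foldl pvBStep (G, some c) = (G, some (c ++ e)) := by
  induction e with
  | nil => intro G c; simp
  | cons x e ih =>
    intro G c
    have hx := h x (by simp)
    simp only [List.foldl_cons, pvBStep, hx, Bool.false_eq_true, if_false]
    rw [ih (fun y hy => h y (by simp [hy])) G (c ++ [x])]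
    simp

theorem pvBStep_free_none (e : List (List (String × String)))
    (h : ∀ x ∈ e, pvPathTop x = false) :
    ∀ (G : List (List (List (String × String)))),
      e.foldl pvBStep (G, none) = (G, none) := by
  induction e with
  | nil => intro G; simp
  | cons x e ih =>
    intro G
    have hx := h x (by simp)
    simp only [List.foldl_cons, pvBStep, hx, Bool.false_eq_true, if_false]
    exact ih (fun y hy => h y (by simp [hy])) G

theorem pvBGroups_snoc (u : List (List (String × String))) (x : List (String × String))
    (e : List (List (String × String))) (hx : pvPathTop x = true)
    (he : ∀ y ∈ e, pvPathTop y = false) :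
    pvBGroups (u ++ x :: e) = pvBGroups u ++ [x :: e] := by
  unfold pvBGroups
  rw [List.foldl_append, List.foldl_cons]
  have hstep : pvBStep (u.foldl pvBStep ([], none)) x
      = (pvBFin (u.foldl pvBStep ([], none)), some [x]) := by
    simp [pvBStep, hx]
  rw [hstep, pvBStep_free e he]
  simp [pvBFin]

theorem pv_topAt (bd : List (List (String × String))) (j : Nat) (hj : j < bd.length) :
    (PySem.List.pyGet? bd (j : Int)).getD [] = bd[j] := by
  simp [PySem.List.pyGet?_natCast, List.getElem?_eq_getElem hj]

theorem pv_main (u : List (List (String × String))) :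
    ∀ (e : List (List (String × String))), (∀ x ∈ e, pvPathTop x = false) →
      pvALoop (u ++ e) (u.length + e.length) ((u.length : Int) + (e.length : Int) - 1) []
        = pvBNew (u ++ e) := by
  induction u using List.reverseRecOn with
  | nil =>
    intro e he
    simp only [List.nil_append, List.length_nil, Nat.cast_zero, zero_add]
    have hskip := pvALoop_skip e e.length 0 ((e.length : Int) - 1) []
      (fun j h1 h2 => by
        rw [pv_topAt e j (by omega)]
        exact he _ (List.getElem_mem _))
    rw [Nat.zero_add] at hskip
    rw [hskip]
    simp only [pvALoop]
    simp [pvBNew, pvBGroups, pvBStep_free_none e he, pvBFin]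
  | append_singleton w x ih =>
    intro e he
    by_cases hx : pvPathTop x = true
    · -- x is a top-level node
      have hskip := pvALoop_skip ((w ++ [x]) ++ e) e.length (w.length + 1)
        (((w ++ [x]).length : Int) + (e.length : Int) - 1) []
        (fun j h1 h2 => by
          rw [pv_topAt _ j (by simp; omega)]
          have hm : ((w ++ [x]) ++ e)[j]'(by simp; omega) ∈ e := by
            rw [List.getElem_append_right (by simp; omega)]
            exact List.getElem_mem _
          exact he _ hm)
      have hlen1 : (w ++ [x]).length = w.length + 1 := by simp
      rw [hlen1] at hskip ⊢
      rw [show w.length + 1 + e.length = (w.length + 1) + e.length from rfl]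
      rw [hskip]
      -- one unfolding step at the marker index w.length
      have hgetx : PySem.List.pyGet? ((w ++ [x]) ++ e) ((w.length : Nat) : Int) = some x := by
        have : (w ++ [x]) ++ e = w ++ x :: e := by simp
        rw [this]
        exact PySem.List.pyGet?_append_length w e x
      show pvALoop ((w ++ [x]) ++ e) (w.length + 1) _ [] = _
      simp only [pvALoop, hgetx, Option.getD_some, hx, if_true]
      -- the slice is the whole tail x :: e
      have hsl : PySem.List.slice ((w ++ [x]) ++ e) (some (w.length : Int))
          (some ((((w.length + 1 : Nat)) : Int) + (e.length : Int) - 1 + 1)) = x :: e := by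
        have hb : (((w.length + 1 : Nat)) : Int) + (e.length : Int) - 1 + 1
            = ((w.length + 1 + e.length : Nat) : Int) := by push_cast; ring
        rw [hb, PySem.List.slice_natCast]
        have hd : ((w ++ [x]) ++ e).drop w.length = x :: e := by
          have : (w ++ [x]) ++ e = w ++ x :: e := by simp
          rw [this]
          exact List.drop_left (l₁ := w)
        rw [hd]
        apply List.take_of_length_le
        simp
        omega
      rw [hsl, pvALoop_acc, List.nil_append]
      rw [show w ++ [x] ++ e = w ++ x :: e from by simp]
      rw [pvALoop_local w ((x :: e)) w.length ((w.length : Int) - 1) [] le_rfl (by omega) (by omega)]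
      have hw := ih [] (by simp)
      simp only [List.append_nil, List.length_nil, Nat.cast_zero, add_zero] at hw
      rw [hw]
      simp [pvBNew, pvBGroups_snoc w x e hx he]
    · -- x is not a top-level node: fold it into the free tail
      have hall : ∀ y ∈ x :: e, pvPathTop y = false := by
        intro y hy
        rcases List.mem_cons.mp hy with h | h
        · simpa [h] using hx
        · exact he y h
      have hmain := ih (x :: e) hall
      have hassoc : w ++ x :: e = (w ++ [x]) ++ e := by simp
      rw [hassoc] at hmain
      have hlen : w.length + (x :: e).length = (w ++ [x]).length + e.length := by simp; omega
      have hleni : (w.length : Int) + ((x :: e).length : Int) - 1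
          = ((w ++ [x]).length : Int) + (e.length : Int) - 1 := by simp; ring
      rw [hlen, hleni] at hmain
      exact hmain
theorem pvRPT_eq (d : List (List (String × String))) (limit : Int) :
    ∀ (count : Int) (i : Nat), count ≤ limit → i ≤ d.length →
      d.take (pvRPTloop d limit count i) = d.take i ++ pvBLimit limit count (d.drop i) := by
  intro count i
  fun_induction pvRPTloop d limit count i with
  | case1 count i h count' hle ih =>
    intro hc hi
    rcases h with ⟨h1, h2⟩
    rw [List.drop_eq_getElem_cons h2]
    by_cases ht : pvPathTop (d[i]'h2) = true
    · have hcv : count' = count + 1 := by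
        simp only [count', pv_topAt d i h2, ht]; simp
      rw [hcv] at hle ih ⊢
      rw [pvBLimit]
      simp only [ht, if_true]
      rw [if_neg (by omega : ¬ (count + 1 > limit))]
      rw [ih hle (by omega)]
      rw [show List.take (i+1) d = List.take i d ++ [d[i]'h2] from by
        rw [List.take_add_one, List.getElem?_eq_getElem h2]; simp]
      rw [List.append_assoc]
      rfl
    · have hcv : count' = count := by
        simp only [count', pv_topAt d i h2, ht]; simp
      rw [hcv] at hle ih ⊢
      rw [pvBLimit]
      simp only [ht, Bool.false_eq_true, if_false]
      rw [ih hle (by omega)]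
      rw [show List.take (i+1) d = List.take i d ++ [d[i]'h2] from by
        rw [List.take_add_one, List.getElem?_eq_getElem h2]; simp]
      rw [List.append_assoc]
      rfl
  | case2 count i h count' hgt =>
    intro hc hi
    rcases h with ⟨h1, h2⟩
    rw [List.drop_eq_getElem_cons h2]
    by_cases ht : pvPathTop (d[i]'h2) = true
    · have hcv : count' = count + 1 := by
        simp only [count', pv_topAt d i h2, ht]; simp
      rw [hcv] at hgt
      rw [pvBLimit]
      simp only [ht, if_true]
      rw [if_pos (by omega)]
      simp
    · exfalso
      have hcv : count' = count := by
        simp only [count', pv_topAt d i h2, ht]; simp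
      rw [hcv] at hgt
      omega
  | case3 count i h =>
    intro hc hi
    have : i = d.length := by
      by_contra hne
      exact h ⟨hc, by omega⟩
    subst this
    simp [pvBLimit]
theorem pv_final : ∀ bd limit order st, repair_desc_tree bd limit order st = repair_desc_tree_alt bd limit order st := by
  intro bd limit order st
  unfold repair_desc_tree repair_desc_tree_alt
  by_cases ho : order = "asc"
  · simp [ho]
  · simp only [ho, if_false]
    have hnd : pvALoop bd bd.length ((bd.length : Int) - 1) [] = pvBNew bd := by
      have := pv_main bd [] (by simp)
      simpa using this
    rw [hnd]
    by_cases hst : st = "tree"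
    · simp [hst]
    · simp only [hst, if_false]
      unfold repair_parent_tree
      rw [PySem.List.slice_to_natCast]
      by_cases hl : limit < 0
      · rw [if_pos hl]
        rw [pvRPTloop]
        rw [dif_neg (by omega)]
        simp
      · rw [if_neg hl]
        have := pvRPT_eq (pvBNew bd) limit 0 0 (by omega) (by omega)
        simpa using this

-- ===== VERDICT (by name: the statement is the Claim_ definition above) =====
theorem repair_desc_tree_spec : Claim_equal_repair_desc_tree := by
  intro bd limit order st _ _
  unfold Spec_repair_desc_tree
  exact pv_final bd limit order st
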